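-- pv_equiv track=rewrite | github.com/KuNyaa/RNA-Design-LM | scripts/plot_bon.py | is_valid_seq
-- ===== SOURCE A (Python) =====
-- def is_valid_seq(seq: str, structure: str) -> bool:
--     if len(seq) != len(structure):
--         return False
--     valid_pairs = {"CG", "GC", "AU", "UA", "GU", "UG"}
--     stack = []
--     for idx, ch in enumerate(structure):
--         if ch == "(":
--             stack.append(idx)
--         elif ch == ")":
--             if not stack:
--                 return False
--             j = stack.pop()
--             if seq[j] + seq[idx] not in valid_pairs:
--                 return False
--         elif ch != ".":
--             return False
--     return not stack
-- ===== SOURCE B (Python) =====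
-- def is_valid_seq(seq: str, structure: str) -> bool:
--     if len(seq) != len(structure):
--         return False
--     valid_pairs = {"CG", "GC", "AU", "UA", "GU", "UG"}
--     # pass 1: bucket bracket positions by nesting depth with a single counter
--     # (no stack); reject bad characters and imbalance
--     levels = []
--     depth = 0
--     for idx, ch in enumerate(structure):
--         if ch == "(":
--             depth += 1
--             if depth > len(levels):
--                 levels.append([])
--             levels[depth - 1].append(idx)
--         elif ch == ")":
--             if depth == 0:
--                 return False
--             levels[depth - 1].append(idx)
--             depth -= 1
--         elif ch != ".":
--             return False
--     if depth != 0: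
--         return False
--     # pass 2: within each depth bucket, bracket positions alternate ( ) ( ) ...
--     # and consecutive positions are exactly the matched pairs
--     for bucket in levels:
--         for i, j in zip(bucket[0::2], bucket[1::2]):
--             if seq[i] + seq[j] not in valid_pairs:
--                 return False
--     return True
-- ===== Notes on version B (the rewrite author's own statement) =====
-- stated objective: alternative
-- what changed: A matches brackets with an index stack and validates each base pair inline as it pops; B keeps no stack: a single counter pass buckets every bracket position by its nesting depth, then a second pass validates the consecutive position pairs inside each depth bucket (brackets at equal depth alternate open/close, so consecutive entries are exactly the matched pairs).
import Mathlib
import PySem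

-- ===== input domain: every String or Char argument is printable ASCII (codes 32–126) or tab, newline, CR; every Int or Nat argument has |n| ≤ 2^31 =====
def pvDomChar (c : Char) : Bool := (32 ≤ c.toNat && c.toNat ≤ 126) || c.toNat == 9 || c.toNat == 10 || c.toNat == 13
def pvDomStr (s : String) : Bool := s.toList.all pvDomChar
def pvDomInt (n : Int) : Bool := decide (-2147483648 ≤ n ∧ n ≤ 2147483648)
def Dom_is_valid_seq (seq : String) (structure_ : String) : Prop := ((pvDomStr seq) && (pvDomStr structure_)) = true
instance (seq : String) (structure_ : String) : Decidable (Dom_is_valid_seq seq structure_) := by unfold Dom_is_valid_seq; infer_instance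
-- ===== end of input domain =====

-- B replaces A's stack matching with inline pair checks by a stackless two-pass algorithm:
-- bucket bracket positions by nesting depth, then validate consecutive pairs per bucket
-- (objective: alternative).

-- ===== PORT A =====
-- A's valid_pairs set of 2-char strings, as lists of chars ("XY" ↔ ['X','Y']); exact since
-- Python's seq[j] + seq[idx] is the 2-char string of those characters.
def validPairsA : List (List Char) :=
  [['C','G'], ['G','C'], ['A','U'], ['U','A'], ['G','U'], ['U','G']]

-- A's single loop over enumerate(structure) with the stack of open-bracket indices.
-- Indices j and idx are always < s.length when reached (lengths equal), so getD is exact.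
def aLoop (s : List Char) : List Char → Nat → List Nat → Bool
  | [], _, stack => stack.isEmpty
  | c :: rest, idx, stack =>
    if c = '(' then aLoop s rest (idx + 1) (idx :: stack)
    else if c = ')' then
      match stack with
      | [] => false
      | j :: st =>
        if [s.getD j ' '] ++ [s.getD idx ' '] ∈ validPairsA then aLoop s rest (idx + 1) st
        else false
    else if c = '.' then aLoop s rest (idx + 1) stack
    else false

def is_valid_seq (seq : String) (structure_ : String) : Bool :=
  if seq.toList.length ≠ structure_.toList.length then false
  else aLoop seq.toList structure_.toList 0 []

-- ===== PORT B =====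
def validPairsB : List (List Char) :=
  [['C','G'], ['G','C'], ['A','U'], ['U','A'], ['G','U'], ['U','G']]

-- B's pass 1: one counter pass bucketing every bracket position by nesting depth;
-- none = bad char or imbalance. The bucket index depth-1 (resp. depth after increment)
-- is always in range in real runs (levels grows with the depth counter), so getD is exact.
def bPass1 : List Char → Nat → Nat → List (List Nat) → Option (List (List Nat))
  | [], _, depth, levels => if depth = 0 then some levels else none
  | c :: rest, idx, depth, levels =>
    if c = '(' then
      let levels1 := if depth + 1 > levels.length then levels ++ [[]] else levels
      bPass1 rest (idx + 1) (depth + 1) (levels1.set depth (levels1.getD depth [] ++ [idx]))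
    else if c = ')' then
      if depth = 0 then none
      else bPass1 rest (idx + 1) (depth - 1) (levels.set (depth - 1) (levels.getD (depth - 1) [] ++ [idx]))
    else if c = '.' then bPass1 rest (idx + 1) depth levels
    else none

-- B's pass 2 over one bucket: zip(bucket[0::2], bucket[1::2]) pairs consecutive
-- positions (a trailing unpaired element is dropped by zip, hence the [_] case).
def chunkOk (s : List Char) : List Nat → Bool
  | [] => true
  | [_] => true
  | i :: j :: rest =>
    decide ([s.getD i ' '] ++ [s.getD j ' '] ∈ validPairsB) && chunkOk s rest

def is_valid_seq_alt (seq : String) (structure_ : String) : Bool :=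
  if seq.toList.length ≠ structure_.toList.length then false
  else
    match bPass1 structure_.toList 0 0 [] with
    | none => false
    | some levels => levels.all (chunkOk seq.toList)

-- ===== PRECONDITION & SPEC =====
def Spec_is_valid_seq (seq : String) (structure_ : String) (out : Bool) : Prop := out = is_valid_seq_alt seq structure_
instance (seq : String) (structure_ : String) (out : Bool) : Decidable (Spec_is_valid_seq seq structure_ out) := by unfold Spec_is_valid_seq; infer_instance

-- ===== CLAIM (what is proved, stated in full; the proofs are below) =====
def Claim_equal_is_valid_seq : Prop := ∀ (seq : String) (structure_ : String), Dom_is_valid_seq seq structure_ → Spec_is_valid_seq seq structure_ (is_valid_seq seq structure_)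

-- ===== LEMMAS AND PROOFS =====

-- getD utilities
lemma pvGetD_set_eq {α : Type} (l : List α) {i : Nat} (h : i < l.length) (v d : α) :
    (l.set i v).getD i d = v := by
  rw [List.getD_eq_getElem _ _ (by simpa using h)]
  exact List.getElem_set_self _

lemma pvGetD_set_ne {α : Type} (l : List α) {i j : Nat} (h : i ≠ j) (v d : α) :
    (l.set i v).getD j d = l.getD j d := by
  by_cases hj : j < l.length
  · rw [List.getD_eq_getElem _ _ (by simpa using hj), List.getD_eq_getElem _ _ hj]
    exact List.getElem_set_ne h _
  · rw [List.getD_eq_default _ _ (by simpa using not_lt.mp hj),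
      List.getD_eq_default _ _ (not_lt.mp hj)]

lemma pvGetD_append_left {α : Type} (l : List α) (x : α) {i : Nat} (h : i < l.length) (d : α) :
    (l ++ [x]).getD i d = l.getD i d := by
  rw [List.getD_eq_getElem _ _ (by simp; omega), List.getD_eq_getElem _ _ h]
  exact List.getElem_append_left h

lemma pvGetD_snoc {α : Type} (l : List α) (x d : α) :
    (l ++ [x]).getD l.length d = x := by
  rw [List.getD_eq_getElem _ _ (by simp)]
  simp

-- bRun: B's remaining computation from a mid-pass-1 state (pass 1 continued, then pass 2)
def bRun (s : List Char) : List Char → Nat → Nat → List (List Nat) → Bool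
  | [], _, depth, levels => if depth = 0 then levels.all (chunkOk s) else false
  | c :: rest, idx, depth, levels =>
    if c = '(' then
      bRun s rest (idx + 1) (depth + 1)
        ((if depth + 1 > levels.length then levels ++ [[]] else levels).set depth
          ((if depth + 1 > levels.length then levels ++ [[]] else levels).getD depth [] ++ [idx]))
    else if c = ')' then
      if depth = 0 then false
      else bRun s rest (idx + 1) (depth - 1)
        (levels.set (depth - 1) (levels.getD (depth - 1) [] ++ [idx]))
    else if c = '.' then bRun s rest (idx + 1) depth levels
    else false

lemma bRun_eq (s : List Char) :
    ∀ (l : List Char) (idx depth : Nat) (levels : List (List Nat)),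
      (match bPass1 l idx depth levels with
       | none => false
       | some L => L.all (chunkOk s)) = bRun s l idx depth levels := by
  intro l
  induction l with
  | nil =>
    intro idx depth levels
    by_cases h : depth = 0 <;> simp [bPass1, bRun, h]
  | cons c rest ih =>
    intro idx depth levels
    simp only [bPass1, bRun]
    split_ifs <;> first | exact ih _ _ _ | rfl

-- chunkOk splits across an even-length prefix
theorem chunk_append (s : List Char) (xs ys : List Nat) (h : xs.length % 2 = 0) :
    chunkOk s (xs ++ ys) = (chunkOk s xs && chunkOk s ys) := by
  match xs with
  | [] => simp [chunkOk]
  | [x] => simp at h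
  | i :: j :: rest =>
    have hr : rest.length % 2 = 0 := by simp [List.length_cons] at h; omega
    simp only [List.cons_append, chunkOk, chunk_append s rest ys hr, Bool.and_assoc]
termination_by xs.length

-- a bucket whose even-length prefix already fails the pair check
def BadAt (s : List Char) (b : List Nat) : Prop :=
  ∃ xs ys, b = xs ++ ys ∧ xs.length % 2 = 0 ∧ chunkOk s xs = false

def HasBad (s : List Char) (levels : List (List Nat)) : Prop :=
  ∃ d, d < levels.length ∧ BadAt s (levels.getD d [])

lemma bad_preserved (s : List Char) (levels L1 : List (List Nat)) (k x : Nat)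
    (hL1 : L1 = levels ∨ L1 = levels ++ [[]]) (h : HasBad s levels) :
    HasBad s (L1.set k (L1.getD k [] ++ [x])) := by
  obtain ⟨d, hd, xs, ys, hb, hev, hbad⟩ := h
  have hdL1 : d < L1.length := by
    rcases hL1 with rfl | rfl
    · exact hd
    · simp; omega
  have hgd : L1.getD d [] = levels.getD d [] := by
    rcases hL1 with rfl | rfl
    · rfl
    · exact pvGetD_append_left _ _ hd _
  refine ⟨d, by simp [List.length_set]; omega, ?_⟩
  by_cases hdk : d = k
  · subst hdk
    rw [pvGetD_set_eq _ hdL1]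
    exact ⟨xs, ys ++ [x], by rw [hgd, hb]; simp, hev, hbad⟩
  · rw [pvGetD_set_ne _ (fun he => hdk he.symm), hgd]
    exact ⟨xs, ys, hb, hev, hbad⟩

lemma bad_stable (s : List Char) :
    ∀ (l : List Char) (idx depth : Nat) (levels : List (List Nat)),
      HasBad s levels → bRun s l idx depth levels = false := by
  intro l
  induction l with
  | nil =>
    intro idx depth levels ⟨d, hd, xs, ys, hb, hev, hbad⟩
    simp only [bRun]
    split_ifs with h
    · apply List.all_eq_false.mpr
      refine ⟨levels.getD d [], ?_, ?_⟩
      · rw [List.getD_eq_getElem _ _ hd]; exact List.getElem_mem hd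
      · rw [hb, chunk_append s xs ys hev, hbad]; simp
    · rfl
  | cons c rest ih =>
    intro idx depth levels hbad
    by_cases h1 : c = '('
    · simp only [bRun, h1, if_pos]
      by_cases happ : depth + 1 > levels.length
      · simp only [happ, if_pos]
        exact ih _ _ _ (bad_preserved s levels _ depth idx (Or.inr rfl) hbad)
      · simp only [happ, if_neg, not_false_iff]
        exact ih _ _ _ (bad_preserved s levels _ depth idx (Or.inl rfl) hbad)
    · by_cases h2 : c = ')'
      · simp only [bRun, h2, if_pos]
        by_cases hz : depth = 0
        · simp [hz]
        · simp only [hz, if_neg, not_false_iff]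
          exact ih _ _ _ (bad_preserved s levels _ (depth - 1) idx (Or.inl rfl) hbad)
      · by_cases h3 : c = '.'
        · simp only [bRun, h3, if_pos, h2]
          exact ih _ _ _ hbad
        · simp [bRun, h1, h2, h3]

-- the invariant tying A's stack to B's depth buckets: bucket d holds an even number of
-- already-validated positions, followed by the pending open at depth d+1 (if any)
def StateInv (s : List Char) (stack : List Nat) (levels : List (List Nat)) : Prop :=
  stack.length ≤ levels.length ∧
  ∀ d, d < levels.length →
    (d < stack.length →
      ∃ front, levels.getD d [] = front ++ [stack.reverse.getD d 0] ∧
        front.length % 2 = 0 ∧ chunkOk s front = true) ∧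
    (stack.length ≤ d →
      (levels.getD d []).length % 2 = 0 ∧ chunkOk s (levels.getD d []) = true)

lemma inv_open (s : List Char) (stack : List Nat) (levels : List (List Nat)) (idx : Nat)
    (h : StateInv s stack levels) :
    StateInv s (idx :: stack)
      ((if stack.length + 1 > levels.length then levels ++ [[]] else levels).set stack.length
        ((if stack.length + 1 > levels.length then levels ++ [[]] else levels).getD stack.length [] ++ [idx])) := by
  obtain ⟨hle, hbk⟩ := h
  by_cases hk : stack.length + 1 > levels.length
  · -- stack.length = levels.length: a fresh bucket is appended and receives idx
    have hkm : stack.length = levels.length := by omega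
    simp only [hk, if_pos]
    have hget : (levels ++ [[]]).getD stack.length [] = ([] : List Nat) := by
      rw [hkm]; exact pvGetD_snoc _ _ _
    rw [hget]
    refine ⟨by simp [List.length_set]; omega, ?_⟩
    intro d hd
    have hd' : d < levels.length + 1 := by simpa [List.length_set] using hd
    constructor
    · intro hdk
      simp only [List.length_cons] at hdk
      rcases Nat.lt_or_ge d stack.length with hlt | hge
      · have hdm : d < levels.length := by omega
        rw [pvGetD_set_ne _ (by omega), pvGetD_append_left _ _ hdm]
        obtain ⟨front, hf, he, ho⟩ := (hbk d hdm).1 hlt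
        refine ⟨front, ?_, he, ho⟩
        rw [hf, List.reverse_cons, pvGetD_append_left _ _ (by simpa using hlt)]
      · have hdk' : d = stack.length := by omega
        subst hdk'
        rw [pvGetD_set_eq _ (by simp; omega)]
        refine ⟨[], ?_, by simp, by simp [chunkOk]⟩
        rw [List.reverse_cons, ← List.length_reverse (as := stack), pvGetD_snoc]
    · intro hge
      exfalso; simp at hge; omega
  · -- the existing (fully validated) bucket at stack.length receives idx
    have hkm : stack.length < levels.length := by omega
    simp only [hk, if_neg, not_false_iff]
    refine ⟨by simp [List.length_set]; omega, ?_⟩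
    intro d hd
    have hd' : d < levels.length := by simpa [List.length_set] using hd
    constructor
    · intro hdk
      simp only [List.length_cons] at hdk
      rcases Nat.lt_or_ge d stack.length with hlt | hge
      · rw [pvGetD_set_ne _ (by omega)]
        obtain ⟨front, hf, he, ho⟩ := (hbk d hd').1 hlt
        refine ⟨front, ?_, he, ho⟩
        rw [hf, List.reverse_cons, pvGetD_append_left _ _ (by simpa using hlt)]
      · have hdk' : d = stack.length := by omega
        subst hdk'
        rw [pvGetD_set_eq _ hkm]
        obtain ⟨he, ho⟩ := (hbk stack.length hkm).2 (le_refl _)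
        refine ⟨levels.getD stack.length [], ?_, he, ho⟩
        rw [List.reverse_cons, ← List.length_reverse (as := stack), pvGetD_snoc]
    · intro hge
      rw [pvGetD_set_ne _ (by simp at hge; omega)]
      exact (hbk d hd').2 (by simp at hge; omega)

lemma close_bucket (s : List Char) (j : Nat) (st : List Nat) (levels : List (List Nat))
    (h : StateInv s (j :: st) levels) :
    ∃ front, levels.getD st.length [] = front ++ [j] ∧
      front.length % 2 = 0 ∧ chunkOk s front = true := by
  obtain ⟨hle, hbk⟩ := h
  have hm : st.length < levels.length := by simp at hle; omega
  obtain ⟨front, hf, he, ho⟩ := (hbk st.length hm).1 (by simp)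
  refine ⟨front, ?_, he, ho⟩
  rw [hf, List.reverse_cons, ← List.length_reverse (as := st), pvGetD_snoc]

lemma inv_close_ok (s : List Char) (j : Nat) (st : List Nat) (levels : List (List Nat))
    (idx : Nat) (h : StateInv s (j :: st) levels)
    (hpair : chunkOk s [j, idx] = true) :
    StateInv s st (levels.set st.length (levels.getD st.length [] ++ [idx])) := by
  obtain ⟨front, hf, he, ho⟩ := close_bucket s j st levels h
  obtain ⟨hle, hbk⟩ := h
  have hm : st.length < levels.length := by simp at hle; omega
  refine ⟨by simp [List.length_set]; omega, ?_⟩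
  intro d hd
  have hd' : d < levels.length := by simpa [List.length_set] using hd
  constructor
  · intro hdk
    rw [pvGetD_set_ne _ (by omega)]
    obtain ⟨front', hf', he', ho'⟩ := (hbk d hd').1 (by simp; omega)
    refine ⟨front', ?_, he', ho'⟩
    rw [hf', List.reverse_cons, pvGetD_append_left _ _ (by simpa using hdk)]
  · intro hge
    rcases Nat.lt_or_ge st.length d with hlt | hge'
    · rw [pvGetD_set_ne _ (by omega)]
      exact (hbk d hd').2 (by simp; omega)
    · have hdk' : d = st.length := by omega
      subst hdk'
      rw [pvGetD_set_eq _ hm, hf]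
      constructor
      · simp; omega
      · have : front ++ [j] ++ [idx] = front ++ [j, idx] := by simp
        rw [this, chunk_append s front [j, idx] he, ho, hpair]
        rfl

-- the main correspondence: A's fused loop equals B's run from a related state
lemma main_inv (s : List Char) :
    ∀ (l : List Char) (idx : Nat) (stack : List Nat) (levels : List (List Nat)),
      StateInv s stack levels →
      aLoop s l idx stack = bRun s l idx stack.length levels := by
  intro l
  induction l with
  | nil =>
    intro idx stack levels ⟨hle, hbk⟩
    cases stack with
    | nil =>
      simp only [aLoop, bRun, List.isEmpty_nil, List.length_nil, if_pos]
      symm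
      apply List.all_eq_true.mpr
      intro b hb
      obtain ⟨d, hd, hbd⟩ := List.mem_iff_getElem.mp hb
      have := (hbk d hd).2 (by simp)
      rw [List.getD_eq_getElem _ _ hd, hbd] at this
      exact this.2
    | cons j st => simp [aLoop, bRun]
  | cons c rest ih =>
    intro idx stack levels hinv
    by_cases h1 : c = '('
    · simp only [aLoop, bRun, h1, if_pos]
      have := ih (idx + 1) (idx :: stack) _ (inv_open s stack levels idx hinv)
      simpa using this
    · by_cases h2 : c = ')'
      · simp only [aLoop, bRun, h1, h2, if_pos, if_neg, not_false_iff]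
        cases stack with
        | nil => simp [aLoop]
        | cons j st =>
          have hdep : (j :: st).length = st.length + 1 := by simp
          rw [hdep]
          simp only [Nat.succ_ne_zero, if_neg, not_false_iff, Nat.add_sub_cancel]
          by_cases hmem : [s.getD j ' '] ++ [s.getD idx ' '] ∈ validPairsA
          · simp only [hmem, if_pos]
            have hpair : chunkOk s [j, idx] = true := by
              simp only [chunkOk, Bool.and_true]
              exact decide_eq_true (by simpa [validPairsA, validPairsB] using hmem)
            exact ih (idx + 1) st _ (inv_close_ok s j st levels idx hinv hpair)
          · simp only [hmem, if_neg, not_false_iff]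
            symm
            apply bad_stable
            obtain ⟨front, hf, he, ho⟩ := close_bucket s j st levels hinv
            have hm : st.length < levels.length := by
              have := hinv.1; simp at this; omega
            refine ⟨st.length, by simp [List.length_set]; omega, ?_⟩
            rw [pvGetD_set_eq _ hm, hf]
            refine ⟨front ++ [j, idx], [], by simp, by simp; omega, ?_⟩
            rw [chunk_append s front [j, idx] he]
            have : chunkOk s [j, idx] = false := by
              simp only [chunkOk, Bool.and_true]
              exact decide_eq_false (by simpa [validPairsA, validPairsB] using hmem)
            rw [this]; simp
      · by_cases h3 : c = '.'
        · simp only [aLoop, bRun, h1, h2, h3, if_pos, if_neg, not_false_iff]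
          exact ih (idx + 1) stack levels hinv
        · simp [aLoop, bRun, h1, h2, h3]

-- ===== VERDICT (by name: the statement is the Claim_ definition above) =====
theorem is_valid_seq_spec : Claim_equal_is_valid_seq := by
  intro seq structure_ _
  unfold Spec_is_valid_seq is_valid_seq is_valid_seq_alt
  split_ifs with h
  · rfl
  · rw [bRun_eq]
    exact main_inv seq.toList structure_.toList 0 [] []
      ⟨Nat.le_refl 0, fun d hd => absurd hd (by simp)⟩
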